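-- pv_equiv track=rewrite | github.com/moonki95/Algorithm | Algo study/11140.py | solution
-- ===== SOURCE A (Python) =====
-- import string
--
-- def solution(word):
--     if "lol" in word:
--         return 0
--     elif "lo" in word or "ol" in word or "ll" in word or any("l" + i + "l" in word for i in string.ascii_lowercase):
--         return 1
--     elif "l" in word or "o" in word:
--         return 2
--     else:
--         return 3
-- ===== SOURCE B (Python) =====
-- import string
--
-- def solution(word):
--     # one left-to-right pass tracking the previous two characters
--     lol = pair = gap = has_l = has_o = False
--     pp = p = None
--     for c in word:
--         has_l = has_l or c == 'l'
--         has_o = has_o or c == 'o'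
--         if p is not None:
--             pair = pair or (p == 'l' and c == 'o') or (p == 'o' and c == 'l') or (p == 'l' and c == 'l')
--         if pp == 'l' and c == 'l':
--             lol = lol or p == 'o'
--             gap = gap or p in string.ascii_lowercase
--         pp, p = p, c
--     if lol:
--         return 0
--     if pair or gap:
--         return 1
--     if has_l or has_o:
--         return 2
--     return 3
-- ===== Notes on version B (the rewrite author's own statement) =====
-- stated objective: alternative
-- what changed: Replaces the 30 substring-containment scans (including the 26 'l?l' probes) by a single left-to-right pass that tracks the previous two characters and sets boolean flags for each pattern class.
import Mathlib
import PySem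

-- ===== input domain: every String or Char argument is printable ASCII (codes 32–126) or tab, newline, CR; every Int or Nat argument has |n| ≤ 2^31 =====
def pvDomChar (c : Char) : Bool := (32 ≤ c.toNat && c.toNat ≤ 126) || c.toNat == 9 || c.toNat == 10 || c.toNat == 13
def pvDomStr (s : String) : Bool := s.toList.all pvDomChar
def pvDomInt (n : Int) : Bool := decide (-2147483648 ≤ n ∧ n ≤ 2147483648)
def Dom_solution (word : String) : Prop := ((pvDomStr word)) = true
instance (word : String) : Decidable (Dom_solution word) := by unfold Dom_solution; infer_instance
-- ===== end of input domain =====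

-- B replaces A's many substring scans (including the 26 "l?l" probes) by one pass keeping the previous two characters (objective: alternative).

-- ===== PORT A =====
-- string.ascii_lowercase
def lowercaseChars : List Char := "abcdefghijklmnopqrstuvwxyz".toList

def solution (word : String) : Int :=
  if PySem.Str.isIn "lol" word then 0
  else if PySem.Str.isIn "lo" word || PySem.Str.isIn "ol" word || PySem.Str.isIn "ll" word
       -- any("l" + i + "l" in word for i in string.ascii_lowercase)
       || lowercaseChars.any (fun i => PySem.Chars.isIn ['l', i, 'l'] word.toList) then 1
  else if PySem.Str.isIn "l" word || PySem.Str.isIn "o" word then 2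
  else 3

-- ===== PORT B =====
-- the for loop of Source B: pp/p are the previous-previous and previous characters (none = not yet seen)
def goB (pp p : Option Char) (lol pair gap hl ho : Bool) : List Char → Int
  | [] => if lol then 0 else if pair || gap then 1 else if hl || ho then 2 else 3
  | c :: t =>
    let hl := hl || (c == 'l')
    let ho := ho || (c == 'o')
    let pair := pair || (match p with
      | some b => (b == 'l' && c == 'o') || (b == 'o' && c == 'l') || (b == 'l' && c == 'l')
      | none => false)
    let hit := (pp == some 'l') && (c == 'l')    -- pp == 'l' and c == 'l'
    let lol := lol || (hit && (p == some 'o'))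
    -- p in string.ascii_lowercase (p is a single character here, so the substring test is membership)
    let gap := gap || (hit && (match p with
      | some b => lowercaseChars.any (fun i => i == b)
      | none => false))
    goB p (some c) lol pair gap hl ho t

def solution_alt (word : String) : Int :=
  goB none none false false false false false word.toList

-- ===== PRECONDITION & SPEC =====
def Spec_solution (word : String) (out : Int) : Prop := out = solution_alt word
instance (word : String) (out : Int) : Decidable (Spec_solution word out) := by unfold Spec_solution; infer_instance

-- ===== CLAIM (what is proved, stated in full; the proofs are below) =====
def Claim_equal_solution : Prop := ∀ (word : String), Dom_solution word → Spec_solution word (solution word)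

-- ===== LEMMAS AND PROOFS =====

-- canonical "some adjacent pair/triple matches" predicates
def adj2 (q : Char → Char → Bool) : List Char → Bool
  | a :: b :: t => q a b || adj2 q (b :: t)
  | _ => false

def adj3 (q : Char → Char → Char → Bool) : List Char → Bool
  | a :: b :: c :: t => q a b c || adj3 q (b :: c :: t)
  | _ => false

-- the same with the two in-flight context characters, matching goB's state
def win2 (q : Char → Char → Bool) : Option Char → List Char → Bool
  | _, [] => false
  | p, c :: t => (match p with | some b => q b c | none => false) || win2 q (some c) t

def win3 (q : Char → Char → Char → Bool) : Option Char → Option Char → List Char → Bool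
  | _, _, [] => false
  | pp, p, c :: t =>
      (match pp, p with | some a, some b => q a b c | _, _ => false) || win3 q p (some c) t

theorem win2_some (q : Char → Char → Bool) (t : List Char) (b : Char) :
    win2 q (some b) t = adj2 q (b :: t) := by
  induction t generalizing b with
  | nil => simp [win2, adj2]
  | cons c u ih => simp [win2, adj2, ih]

theorem win2_none (q : Char → Char → Bool) (l : List Char) :
    win2 q none l = adj2 q l := by
  cases l with
  | nil => rfl
  | cons c t => simp [win2, win2_some]

theorem win3_some (q : Char → Char → Char → Bool) (t : List Char) (a b : Char) :
    win3 q (some a) (some b) t = adj3 q (a :: b :: t) := by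
  induction t generalizing a b with
  | nil => simp [win3, adj3]
  | cons c u ih => simp [win3, adj3, ih]

theorem win3_none_some (q : Char → Char → Char → Bool) (t : List Char) (b : Char) :
    win3 q none (some b) t = adj3 q (b :: t) := by
  cases t with
  | nil => simp [win3, adj3]
  | cons c u => simp [win3, win3_some]

theorem win3_none (q : Char → Char → Char → Bool) (l : List Char) :
    win3 q none none l = adj3 q l := by
  cases l with
  | nil => rfl
  | cons c t => simp [win3, win3_none_some]

-- substring containment of 1/2/3-letter patterns = membership / adjacent-window match
theorem infix1 (x : Char) (l : List Char) :
    ([x] <:+: l) ↔ l.any (fun c => c == x) = true := by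
  induction l with
  | nil => simp
  | cons h t ih =>
    rw [List.infix_cons_iff, ih]
    cases t <;> simp [List.cons_prefix_cons, @eq_comm Char x]

theorem isIn1 (x : Char) (l : List Char) :
    PySem.Chars.isIn [x] l = l.any (fun c => c == x) := by
  rw [Bool.eq_iff_iff, PySem.Chars.isIn_iff_infix, infix1]

theorem infix2 (x y : Char) (l : List Char) :
    ([x, y] <:+: l) ↔ adj2 (fun a b => x == a && y == b) l = true := by
  induction l with
  | nil => simp [adj2]
  | cons h t ih =>
    rw [List.infix_cons_iff, ih]
    cases t with
    | nil => simp [adj2, List.cons_prefix_cons]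
    | cons b u => simp [adj2, List.cons_prefix_cons]

theorem isIn2 (x y : Char) (l : List Char) :
    PySem.Chars.isIn [x, y] l = adj2 (fun a b => x == a && y == b) l := by
  rw [Bool.eq_iff_iff, PySem.Chars.isIn_iff_infix, infix2]

theorem infix3 (x y z : Char) (l : List Char) :
    ([x, y, z] <:+: l) ↔ adj3 (fun a b c => x == a && y == b && z == c) l = true := by
  induction l with
  | nil => simp [adj3]
  | cons h t ih =>
    rw [List.infix_cons_iff, ih]
    cases t with
    | nil => simp [adj3, List.cons_prefix_cons]
    | cons b u =>
      cases u with
      | nil => simp [adj3, List.cons_prefix_cons]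
      | cons c v => simp [adj3, List.cons_prefix_cons, and_assoc]

theorem isIn3 (x y z : Char) (l : List Char) :
    PySem.Chars.isIn [x, y, z] l = adj3 (fun a b c => x == a && y == b && z == c) l := by
  rw [Bool.eq_iff_iff, PySem.Chars.isIn_iff_infix, infix3]

theorem adj2_or (q1 q2 : Char → Char → Bool) (l : List Char) :
    (adj2 q1 l || adj2 q2 l) = adj2 (fun a b => q1 a b || q2 a b) l := by
  induction l with
  | nil => simp [adj2]
  | cons h t ih =>
    cases t with
    | nil => simp [adj2]
    | cons b u =>
      simp only [adj2, ← ih]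
      cases q1 h b <;> cases q2 h b <;> simp

theorem adj2_congr (q q' : Char → Char → Bool) (hq : ∀ a b, q a b = q' a b) (l : List Char) :
    adj2 q l = adj2 q' l := by
  induction l with
  | nil => simp [adj2]
  | cons h t ih =>
    cases t with
    | nil => simp [adj2]
    | cons b u => simp only [adj2] at *; rw [hq, ih]

theorem adj3_congr (q q' : Char → Char → Char → Bool) (hq : ∀ a b c, q a b c = q' a b c)
    (l : List Char) : adj3 q l = adj3 q' l := by
  induction l with
  | nil => simp [adj3]
  | cons h t ih =>
    cases t with
    | nil => simp [adj3]
    | cons b u =>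
      cases u with
      | nil => simp [adj3]
      | cons c v => simp only [adj3] at *; rw [hq, ih]

theorem any_or {α : Type} (L : List α) (f g : α → Bool) :
    L.any (fun x => f x || g x) = (L.any f || L.any g) := by
  induction L with
  | nil => simp
  | cons h t ih => simp [ih, Bool.or_assoc, Bool.or_left_comm]

-- any_i (adjacent triple matching P i) = adjacent triple matching (any_i P i)
theorem any_adj3 (L : List Char) (P : Char → Char → Char → Char → Bool) (l : List Char) :
    L.any (fun i => adj3 (P i) l) = adj3 (fun a b c => L.any (fun i => P i a b c)) l := by
  induction l with
  | nil => simp [adj3]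
  | cons h t ih =>
    cases t with
    | nil => simp [adj3]
    | cons b u =>
      cases u with
      | nil => simp [adj3]
      | cons c v =>
        simp only [adj3, any_or, ih]

theorem any_pull (L : List Char) (x y : Bool) (f : Char → Bool) :
    L.any (fun i => x && f i && y) = (x && L.any f && y) := by
  cases x <;> cases y <;> simp

-- goB's loop invariant: the final verdict from the accumulated flags and the remaining input
theorem goB_spec (t : List Char) (pp p : Option Char) (lol pair gap hl ho : Bool) :
    goB pp p lol pair gap hl ho t =
      (if lol || win3 (fun a b c => (a == 'l' && c == 'l') && (b == 'o')) pp p t then 0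
       else if (pair || win2 (fun b c => (b == 'l' && c == 'o') || (b == 'o' && c == 'l') || (b == 'l' && c == 'l')) p t)
            || (gap || win3 (fun a b c => (a == 'l' && c == 'l') && lowercaseChars.any (fun i => i == b)) pp p t) then 1
       else if (hl || t.any (fun c => c == 'l')) || (ho || t.any (fun c => c == 'o')) then 2
       else 3) := by
  induction t generalizing pp p lol pair gap hl ho with
  | nil => simp [goB, win2, win3]
  | cons c u ih =>
    rw [show goB pp p lol pair gap hl ho (c :: u) = goB p (some c)
        (lol || (((pp == some 'l') && (c == 'l')) && (p == some 'o')))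
        (pair || (match p with
          | some b => (b == 'l' && c == 'o') || (b == 'o' && c == 'l') || (b == 'l' && c == 'l')
          | none => false))
        (gap || (((pp == some 'l') && (c == 'l')) && (match p with
          | some b => lowercaseChars.any (fun i => i == b)
          | none => false)))
        (hl || (c == 'l')) (ho || (c == 'o')) u from rfl, ih]
    cases pp <;> cases p <;>
      simp only [win2, win3, List.any_cons, Bool.or_assoc, Bool.and_assoc, Bool.or_false,
        Bool.false_and, Bool.and_false, Bool.false_or, Option.some_beq_some,
        Option.none_beq_some]

-- ===== VERDICT (by name: the statement is the Claim_ definition above) =====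
theorem solution_spec : Claim_equal_solution := by
  intro word _
  unfold Spec_solution solution solution_alt
  rw [goB_spec]
  simp only [win2_none, win3_none, PySem.Str.isIn_eq,
    show ("lol".toList) = ['l','o','l'] from rfl, show ("lo".toList) = ['l','o'] from rfl,
    show ("ol".toList) = ['o','l'] from rfl, show ("ll".toList) = ['l','l'] from rfl,
    show ("l".toList) = ['l'] from rfl, show ("o".toList) = ['o'] from rfl]
  have hLOL : PySem.Chars.isIn ['l','o','l'] word.toList
      = adj3 (fun a b c => (a == 'l' && c == 'l') && (b == 'o')) word.toList := by
    rw [isIn3]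
    apply adj3_congr
    intro a b c
    simp [Bool.beq_comm, Bool.and_comm, Bool.and_left_comm, Bool.and_assoc]
  have hPAIR : (PySem.Chars.isIn ['l','o'] word.toList || PySem.Chars.isIn ['o','l'] word.toList
        || PySem.Chars.isIn ['l','l'] word.toList)
      = adj2 (fun b c => (b == 'l' && c == 'o') || (b == 'o' && c == 'l') || (b == 'l' && c == 'l'))
          word.toList := by
    rw [isIn2, isIn2, isIn2, adj2_or, adj2_or]
    apply adj2_congr
    intro a b
    simp [Bool.beq_comm]
  have hGAP : lowercaseChars.any (fun i => PySem.Chars.isIn ['l', i, 'l'] word.toList)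
      = adj3 (fun a b c => (a == 'l' && c == 'l') && lowercaseChars.any (fun i => i == b))
          word.toList := by
    simp only [isIn3]
    rw [any_adj3]
    apply adj3_congr
    intro a b c
    rw [any_pull lowercaseChars ('l' == a) ('l' == c) (fun i => i == b)]
    simp [Bool.beq_comm, Bool.and_comm, Bool.and_left_comm, Bool.and_assoc]
  simp only [isIn1, hLOL, hPAIR, hGAP, Bool.false_or]
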